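-- pv_equiv track=rewrite | github.com/AlexMakesSoftware/mock_data_generator | scrap.py | cph
-- ===== SOURCE A (Python) =====
-- def cph(total, farms_per_parishes):
--     county = 1
--     parish = 1
--     holding = 1
--
--     farms_per_parish =  total // farms_per_parishes
--     farms_in_parish = 0
--
--     for count in range(total):
--         yield county, parish, holding
--
--         holding+=1
--         farms_in_parish+=1
--         if farms_in_parish>farms_per_parishes:
--             parish=1
--             county+=1
--             holding=1
--             farms_in_parish=0
-- ===== SOURCE B (Python) =====
-- def cph(total, farms_per_parishes):
--     # closed form: parishes are always 1; groups of g = farms_per_parishes + 1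
--     # consecutive holdings share a county (negative values reset every step).
--     g = max(farms_per_parishes + 1, 1)
--     for i in range(total):
--         yield i // g + 1, 1, i % g + 1
-- ===== Notes on version B (the rewrite author's own statement) =====
-- stated objective: simpler
-- what changed: B replaces A's running counters with a reset branch (county/parish/holding/farms_in_parish) by a closed-form per-index formula (i // g + 1, 1, i % g + 1) with group size g = max(farms_per_parishes + 1, 1).
-- crash fix: When farms_per_parishes == 0, A raises ZeroDivisionError on the eager 'total // farms_per_parishes' as soon as the generator is iterated (for any total); B returns the sequence (i+1, 1, 1) (Raises_ is bounded to total <= 2**20 so the value is materialisable). — e.g. on cph(3, 0): A raises ZeroDivisionError, B returns [(1, 1, 1), (2, 1, 1), (3, 1, 1)]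
import Mathlib
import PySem

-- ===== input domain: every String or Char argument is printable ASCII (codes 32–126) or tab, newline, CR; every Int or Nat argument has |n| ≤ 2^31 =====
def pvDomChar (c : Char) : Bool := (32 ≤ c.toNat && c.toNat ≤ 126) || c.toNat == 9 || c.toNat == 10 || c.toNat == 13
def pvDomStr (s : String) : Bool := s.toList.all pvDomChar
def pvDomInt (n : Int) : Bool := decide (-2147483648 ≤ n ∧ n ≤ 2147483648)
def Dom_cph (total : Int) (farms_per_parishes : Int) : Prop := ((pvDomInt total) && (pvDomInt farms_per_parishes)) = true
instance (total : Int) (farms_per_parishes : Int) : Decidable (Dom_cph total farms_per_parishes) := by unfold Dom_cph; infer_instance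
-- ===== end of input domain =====

-- B replaces A's running counters + reset branch by a closed-form (i // g + 1, 1, i % g + 1) per index, for simplicity.
-- A raises ZeroDivisionError when farms_per_parishes == 0 (excluded by Pre_); B returns a value there (Raises_ block).


-- ===== PORT A =====
-- state: (out, county, parish, holding, farms_in_parish)
def cphStep (fpp : Int) (st : List (Int × Int × Int) × Int × Int × Int × Int) (_count : Int) :
    List (Int × Int × Int) × Int × Int × Int × Int :=
  let out := st.1 ++ [(st.2.1, st.2.2.1, st.2.2.2.1)]
  let holding := st.2.2.2.1 + 1
  let farms_in_parish := st.2.2.2.2 + 1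
  if farms_in_parish > fpp then (out, st.2.1 + 1, 1, 1, 0)
  else (out, st.2.1, st.2.2.1, holding, farms_in_parish)

def cph (total : Int) (farms_per_parishes : Int) : List (Int × Int × Int) :=
  -- farms_per_parish = total // farms_per_parishes : computed eagerly, never used
  let _farms_per_parish := PySem.Int.floordiv total farms_per_parishes
  ((PySem.List.pyRange 0 total 1).foldl (cphStep farms_per_parishes) ([], 1, 1, 1, 0)).1

-- ===== PORT B =====
def cph_alt (total : Int) (farms_per_parishes : Int) : List (Int × Int × Int) :=
  let g := max (farms_per_parishes + 1) 1
  (PySem.List.pyRange 0 total 1).map (fun i => (PySem.Int.floordiv i g + 1, 1, PySem.Int.mod i g + 1))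

-- ===== PRECONDITION & SPEC =====
-- A divides by farms_per_parishes before the loop, so it raises ZeroDivisionError whenever it is 0.
def Pre_cph (total : Int) (farms_per_parishes : Int) : Prop := farms_per_parishes ≠ 0
instance (total : Int) (farms_per_parishes : Int) : Decidable (Pre_cph total farms_per_parishes) := by unfold Pre_cph; infer_instance
def pvWitness_cph : Int × Int := (10, 3)

-- When farms_per_parishes == 0, A raises ZeroDivisionError as soon as the generator is iterated (any total); B yields (i+1, 1, 1) for each i (region bounded to total ≤ 2^20 so B's value is materialisable).
def Raises_cph (total : Int) (farms_per_parishes : Int) : Prop := farms_per_parishes = 0 ∧ total ≤ 1048576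
instance (total : Int) (farms_per_parishes : Int) : Decidable (Raises_cph total farms_per_parishes) := by unfold Raises_cph; infer_instance
def pvRaiseWitness_cph : Int × Int := (3, 0)
def pvRaiseWitnessOut_cph : List (Int × Int × Int) := [(1, 1, 1), (2, 1, 1), (3, 1, 1)]

def Spec_cph (total : Int) (farms_per_parishes : Int) (out : List (Int × Int × Int)) : Prop := out = cph_alt total farms_per_parishes
instance (total : Int) (farms_per_parishes : Int) (out : List (Int × Int × Int)) : Decidable (Spec_cph total farms_per_parishes out) := by unfold Spec_cph; infer_instance

-- ===== CLAIM (what is proved, stated in full; the proofs are below) =====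
def Claim_equal_cph : Prop := ∀ (total : Int) (farms_per_parishes : Int), Dom_cph total farms_per_parishes → Pre_cph total farms_per_parishes → Spec_cph total farms_per_parishes (cph total farms_per_parishes)
def Claim_raises_cph : Prop := (∀ (total : Int) (farms_per_parishes : Int), Dom_cph total farms_per_parishes → Raises_cph total farms_per_parishes → ¬ Pre_cph total farms_per_parishes) ∧ (Dom_cph (pvRaiseWitness_cph.1) (pvRaiseWitness_cph.2) ∧ Raises_cph (pvRaiseWitness_cph.1) (pvRaiseWitness_cph.2) ∧ cph_alt (pvRaiseWitness_cph.1) (pvRaiseWitness_cph.2) = pvRaiseWitnessOut_cph)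

-- ===== LEMMAS AND PROOFS =====

-- division step facts for a positive divisor (Int ediv/emod)
theorem pv_step_div (g n : Int) (hg : 0 < g) (_hn : 0 ≤ n) :
    (n % g = g - 1 → (n + 1) % g = 0 ∧ (n + 1) / g = n / g + 1) ∧
    (n % g ≠ g - 1 → (n + 1) % g = n % g + 1 ∧ (n + 1) / g = n / g) := by
  have h0 := Int.emod_nonneg n (by omega : g ≠ 0)
  have h1 := Int.emod_lt_of_pos n hg
  have h2 := Int.mul_ediv_add_emod n g
  have h3 : g * (n / g + 1) = g * (n / g) + g := by ring
  constructor
  · intro hmod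
    have huniq : (n + 1) / g = n / g + 1 ∧ (n + 1) % g = 0 :=
      (Int.ediv_emod_unique hg).2 (by omega)
    exact ⟨huniq.2, huniq.1⟩
  · intro hmod
    have huniq : (n + 1) / g = n / g ∧ (n + 1) % g = n % g + 1 :=
      (Int.ediv_emod_unique hg).2 (by omega)
    exact ⟨huniq.2, huniq.1⟩

-- loop invariant: after processing 0..n-1, A's state is the closed form
theorem pv_invariant (fpp g : Int) (hg : 0 < g)
    (hcond : ∀ r : Int, 0 ≤ r → r < g → (r + 1 > fpp ↔ r = g - 1)) (n : Nat) :
    ((List.range n).map (fun k : Nat => (k : Int))).foldl (cphStep fpp) ([], 1, 1, 1, 0) =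
      ((List.range n).map (fun k : Nat => ((k : Int) / g + 1, 1, (k : Int) % g + 1)),
        (n : Int) / g + 1, 1, (n : Int) % g + 1, (n : Int) % g) := by
  induction n with
  | zero => simp
  | succ n ih =>
    rw [List.range_succ, List.map_append, List.map_append, List.foldl_append, ih]
    have h0 := Int.emod_nonneg (n : Int) (by omega : g ≠ 0)
    have h1 := Int.emod_lt_of_pos (n : Int) hg
    have hstep := pv_step_div g (n : Int) hg (by positivity)
    simp only [List.map_cons, List.map_nil, List.foldl_cons, List.foldl_nil, cphStep]
    by_cases hmod : (n : Int) % g = g - 1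
    · have hc : (n : Int) % g + 1 > fpp := ((hcond ((n : Int) % g) h0 h1).2 hmod)
      have hd := hstep.1 hmod
      rw [if_pos hc]
      push_cast
      simp [hd.1, hd.2]
    · have hc : ¬ ((n : Int) % g + 1 > fpp) := fun h => hmod ((hcond ((n : Int) % g) h0 h1).1 h)
      have hd := hstep.2 hmod
      rw [if_neg hc]
      push_cast
      simp [hd.1, hd.2]

-- ===== VERDICT (by name: the statement is the Claim_ definition above) =====
theorem cph_spec : Claim_equal_cph := by
  intro total fpp _hdom hpre
  unfold Pre_cph at hpre
  unfold Spec_cph cph cph_alt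
  have hrange : PySem.List.pyRange 0 total 1 = (List.range (total.toNat)).map (fun k : Nat => (k : Int)) := by
    rw [PySem.List.pyRange_one]
    simp
  set g : Int := max (fpp + 1) 1 with hgdef
  have hg : 0 < g := lt_of_lt_of_le one_pos (le_max_right _ _)
  have hcond : ∀ r : Int, 0 ≤ r → r < g → (r + 1 > fpp ↔ r = g - 1) := by
    intro r hr0 hrg
    rcases lt_or_ge fpp 0 with hneg | hpos
    · have : g = 1 := by simp [hgdef]; omega
      rw [this] at hrg ⊢; omega
    · have : g = fpp + 1 := by simp [hgdef]; omega
      rw [this] at hrg ⊢; omega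
  rw [hrange, pv_invariant fpp g hg hcond, List.map_map]
  apply List.map_congr_left
  intro k hk
  simp only [Function.comp]
  rw [PySem.Int.floordiv_eq_ediv_of_pos hg, PySem.Int.mod_eq_emod_of_pos hg]

def cph_raises : Claim_raises_cph := by
  unfold Claim_raises_cph
  exact ⟨by intro _ _ _ h; simp [Raises_cph] at h; simp [Pre_cph, h.1], by decide⟩
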